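-- pv_equiv track=rewrite | github.com/toonarmycaptain/AoC_2018 | AoC_2018_Day_3/Day_3_part_a.py | make_coord_dict
-- ===== SOURCE A (Python) =====
-- def make_coord_dict(puzzle_input):
--     coord_dict = {}
--
--     for rectangle  in puzzle_input.values():
--
--         start_x_coord = rectangle[0][0]
--         start_y_coord = rectangle[0][1]
--         x_dim = rectangle[1][0]
--         y_dim = rectangle[1][1]
--         for x in range(x_dim):
--             for y in range(y_dim):
--                 coordinates = (start_x_coord + x, start_y_coord + y)
--                 coord_dict[coordinates] = coord_dict.get(coordinates, 0) + 1
--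
--     return coord_dict
-- ===== SOURCE B (Python) =====
-- def make_coord_dict(puzzle_input):
--     rects = [(r[0][0], r[0][1], r[1][0], r[1][1]) for r in puzzle_input.values()]
--     cells = [(sx + x, sy + y)
--              for sx, sy, w, h in rects
--              for x in range(w)
--              for y in range(h)]
--     return {(cx, cy): sum(1 for sx, sy, w, h in rects
--                           if sx <= cx < sx + w and sy <= cy < sy + h)
--             for (cx, cy) in dict.fromkeys(cells)}
-- ===== Notes on version B (the rewrite author's own statement) =====
-- stated objective: alternative
-- what changed: Instead of incrementally incrementing a dict entry per cell inside nested loops, B builds the flat cell list once, deduplicates it in first-occurrence order with dict.fromkeys, and computes each key's count by a geometric rectangle-containment test summed over the rectangles.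
import Mathlib
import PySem

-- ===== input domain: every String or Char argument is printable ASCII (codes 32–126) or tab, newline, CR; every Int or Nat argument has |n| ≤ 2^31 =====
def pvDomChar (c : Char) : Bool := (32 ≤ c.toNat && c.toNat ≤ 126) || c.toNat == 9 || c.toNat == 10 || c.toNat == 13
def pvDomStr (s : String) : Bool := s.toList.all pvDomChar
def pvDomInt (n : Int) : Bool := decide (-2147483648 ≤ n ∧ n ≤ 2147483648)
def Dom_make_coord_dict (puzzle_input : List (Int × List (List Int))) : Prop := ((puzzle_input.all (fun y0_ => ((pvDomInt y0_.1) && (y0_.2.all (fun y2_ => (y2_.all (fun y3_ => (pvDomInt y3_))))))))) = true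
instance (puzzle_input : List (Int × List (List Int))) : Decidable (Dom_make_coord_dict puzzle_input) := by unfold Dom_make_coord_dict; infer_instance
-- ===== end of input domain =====

-- B replaces A's incremental per-cell dict increments by a flat cell list, an ordered dedup and a
-- per-key rectangle-containment count ('alternative': different algorithm, similar cost).


-- ===== PORT A =====
-- literal port of A: for each dict value, nested range loops incrementing the coordinate's dict entry;
-- Python's raising list indexing is ported as pyGetD (in range on every input admitted by Pre_make_coord_dict).
def make_coord_dict (puzzle_input : List (Int × List (List Int))) : List (Int × Int × Int) :=
  let coord_dict : PySem.Dict (Int × Int) Int :=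
    (PySem.Dict.ofList puzzle_input).values.foldl (fun d rectangle =>
      let start_x_coord := PySem.List.pyGetD (PySem.List.pyGetD rectangle 0 []) 0 0
      let start_y_coord := PySem.List.pyGetD (PySem.List.pyGetD rectangle 0 []) 1 0
      let x_dim := PySem.List.pyGetD (PySem.List.pyGetD rectangle 1 []) 0 0
      let y_dim := PySem.List.pyGetD (PySem.List.pyGetD rectangle 1 []) 1 0
      (PySem.List.pyRange 0 x_dim 1).foldl (fun d x =>
        (PySem.List.pyRange 0 y_dim 1).foldl (fun d y =>
          d.insert (start_x_coord + x, start_y_coord + y)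
            (d.getD (start_x_coord + x, start_y_coord + y) 0 + 1)) d) d)
      PySem.Dict.empty
  coord_dict.items.map (fun p => (p.1.1, p.1.2, p.2))

-- ===== PORT B =====
-- start x, start y, width, height of one rectangle value (first two entries of its first two rows)
def pvRectOf (r : List (List Int)) : Int × Int × Int × Int :=
  (PySem.List.pyGetD (PySem.List.pyGetD r 0 []) 0 0,
   PySem.List.pyGetD (PySem.List.pyGetD r 0 []) 1 0,
   PySem.List.pyGetD (PySem.List.pyGetD r 1 []) 0 0,
   PySem.List.pyGetD (PySem.List.pyGetD r 1 []) 1 0)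

-- the flat cell comprehension of one rectangle
def pvCellsOf (t : Int × Int × Int × Int) : List (Int × Int) :=
  (PySem.List.pyRange 0 t.2.2.1 1).flatMap (fun x =>
    (PySem.List.pyRange 0 t.2.2.2 1).map (fun y => (t.1 + x, t.2.1 + y)))

-- sx <= cx < sx + w and sy <= cy < sy + h
def pvCovers (c : Int × Int) (t : Int × Int × Int × Int) : Bool :=
  decide (t.1 ≤ c.1 ∧ c.1 < t.1 + t.2.2.1 ∧ t.2.1 ≤ c.2 ∧ c.2 < t.2.1 + t.2.2.2)

def make_coord_dict_alt (puzzle_input : List (Int × List (List Int))) : List (Int × Int × Int) :=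
  let rects := (PySem.Dict.ofList puzzle_input).values.map pvRectOf
  let cells := rects.flatMap pvCellsOf
  (PySem.List.dedup cells).map (fun c =>
    (c.1, c.2, (rects.map (fun t => if pvCovers c t then (1 : Int) else 0)).sum))

-- ===== PRECONDITION & SPEC =====
-- exactly the inputs on which Python A returns: every rectangle value of the dict has at least two
-- rows and its first two rows at least two entries each (otherwise A's indexing into the rectangle
-- raises IndexError; B raises there too).
def Pre_make_coord_dict (puzzle_input : List (Int × List (List Int))) : Prop :=
  ∀ r ∈ (PySem.Dict.ofList puzzle_input).values,
    2 ≤ r.length ∧ 2 ≤ (PySem.List.pyGetD r 0 []).length ∧ 2 ≤ (PySem.List.pyGetD r 1 []).length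
instance (puzzle_input : List (Int × List (List Int))) : Decidable (Pre_make_coord_dict puzzle_input) := by unfold Pre_make_coord_dict; infer_instance
def pvWitness_make_coord_dict : (List (Int × List (List Int))) := [(1, [[0, 0], [2, 2]]), (2, [[1, 1], [2, 1]])]

def Spec_make_coord_dict (puzzle_input : List (Int × List (List Int))) (out : List (Int × Int × Int)) : Prop := out = make_coord_dict_alt puzzle_input
instance (puzzle_input : List (Int × List (List Int))) (out : List (Int × Int × Int)) : Decidable (Spec_make_coord_dict puzzle_input out) := by unfold Spec_make_coord_dict; infer_instance

-- ===== CLAIM (what is proved, stated in full; the proofs are below) =====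
def Claim_equal_make_coord_dict : Prop := ∀ (puzzle_input : List (Int × List (List Int))), Dom_make_coord_dict puzzle_input → Pre_make_coord_dict puzzle_input → Spec_make_coord_dict puzzle_input (make_coord_dict puzzle_input)

-- ===== LEMMAS AND PROOFS =====

-- count of a fixed pair in one row of cells (first coordinate fixed, y ranging)
theorem pv_count_row (a sy cx cy : Int) : ∀ (n : Nat) (lo : Int),
    ((PySem.List.pyRange lo (lo + n) 1).map (fun y => (a, sy + y))).count (cx, cy)
      = if a = cx ∧ sy + lo ≤ cy ∧ cy < sy + (lo + n) then 1 else 0 := by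
  intro n
  induction n with
  | zero =>
    intro lo
    have h : PySem.List.pyRange lo (lo + ((0:Nat):Int)) 1 = [] := by
      simp [PySem.List.pyRange]
    simp only [h, List.map_nil, List.count_nil]
    split_ifs with hc
    · exfalso; push_cast at hc; omega
    · rfl
  | succ m ih =>
    intro lo
    have hlt : lo < lo + (((m+1:Nat)):Int) := by push_cast; omega
    rw [PySem.List.pyRange_one_cons hlt]
    have ihm := ih (lo + 1)
    rw [show ((lo + 1) + ((m:Nat):Int)) = lo + (((m+1:Nat)):Int) from by push_cast; omega] at ihm
    simp only [List.map_cons, List.count_cons, ihm, beq_iff_eq, Prod.mk.injEq]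
    push_cast
    split_ifs <;> omega

theorem pv_count_row' (a sy cx cy lo hi : Int) :
    ((PySem.List.pyRange lo hi 1).map (fun y => (a, sy + y))).count (cx, cy)
      = if a = cx ∧ sy + lo ≤ cy ∧ cy < sy + hi then 1 else 0 := by
  by_cases hle : lo ≤ hi
  · have h := pv_count_row a sy cx cy (hi - lo).toNat lo
    rw [show lo + (((hi - lo).toNat : Nat) : Int) = hi from by omega] at h
    exact h
  · have he : PySem.List.pyRange lo hi 1 = [] := by
      simp [PySem.List.pyRange]; omega
    simp only [he, List.map_nil, List.count_nil]
    split_ifs with hc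
    · exfalso; omega
    · rfl

theorem pv_count_block (sx sy hh cx cy : Int) : ∀ (n : Nat) (lo : Int),
    ((PySem.List.pyRange lo (lo + n) 1).flatMap (fun x =>
        (PySem.List.pyRange 0 hh 1).map (fun y => (sx + x, sy + y)))).count (cx, cy)
      = if sx + lo ≤ cx ∧ cx < sx + (lo + n) ∧ sy ≤ cy ∧ cy < sy + hh then 1 else 0 := by
  intro n
  induction n with
  | zero =>
    intro lo
    have h : PySem.List.pyRange lo (lo + ((0:Nat):Int)) 1 = [] := by
      simp [PySem.List.pyRange]
    simp only [h, List.flatMap_nil, List.count_nil]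
    split_ifs with hc
    · exfalso; push_cast at hc; omega
    · rfl
  | succ m ih =>
    intro lo
    have hlt : lo < lo + (((m+1:Nat)):Int) := by push_cast; omega
    rw [PySem.List.pyRange_one_cons hlt]
    have ihm := ih (lo + 1)
    rw [show ((lo + 1) + ((m:Nat):Int)) = lo + (((m+1:Nat)):Int) from by push_cast; omega] at ihm
    rw [List.flatMap_cons, List.count_append, ihm, pv_count_row' (sx + lo) sy cx cy 0 hh]
    push_cast
    split_ifs <;> omega

-- count of one cell in one rectangle's cell list = 0/1 by the containment test
theorem pv_count_cellsOf (t : Int × Int × Int × Int) (c : Int × Int) :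
    (pvCellsOf t).count c = if pvCovers c t then 1 else 0 := by
  obtain ⟨sx, sy, w, h⟩ := t
  obtain ⟨cx, cy⟩ := c
  by_cases hle : (0:Int) ≤ w
  · have hb := pv_count_block sx sy h cx cy w.toNat 0
    rw [show ((0:Int) + ((w.toNat : Nat) : Int)) = w from by omega] at hb
    simp only [pvCellsOf, pvCovers, decide_eq_true_eq]
    rw [hb]
    split_ifs <;> omega
  · have he : PySem.List.pyRange 0 w 1 = [] := by
      simp [PySem.List.pyRange]; omega
    simp only [pvCellsOf, pvCovers, he, List.flatMap_nil, List.count_nil, decide_eq_true_eq]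
    split_ifs with hc
    · exfalso; omega
    · rfl

-- count over the whole flat cell list = the rectangle-containment sum of B
theorem pv_count_cells (c : Int × Int) : ∀ (rects : List (Int × Int × Int × Int)),
    ((rects.flatMap pvCellsOf).count c : Int)
      = (rects.map (fun t => if pvCovers c t then (1 : Int) else 0)).sum := by
  intro rects
  induction rects with
  | nil => simp
  | cons t ts ih =>
    rw [List.flatMap_cons, List.count_append, List.map_cons, List.sum_cons, ← ih,
      pv_count_cellsOf t c]
    push_cast
    split_ifs <;> ring

-- A's dict is the Counter of the flat cell list
theorem pv_dict_eq_counter (vals : List (List (List Int))) :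
    vals.foldl (fun d rectangle =>
      (PySem.List.pyRange 0 (PySem.List.pyGetD (PySem.List.pyGetD rectangle 1 []) 0 0) 1).foldl (fun d x =>
        (PySem.List.pyRange 0 (PySem.List.pyGetD (PySem.List.pyGetD rectangle 1 []) 1 0) 1).foldl (fun d y =>
          d.insert (PySem.List.pyGetD (PySem.List.pyGetD rectangle 0 []) 0 0 + x,
                    PySem.List.pyGetD (PySem.List.pyGetD rectangle 0 []) 1 0 + y)
            (d.getD (PySem.List.pyGetD (PySem.List.pyGetD rectangle 0 []) 0 0 + x,
                     PySem.List.pyGetD (PySem.List.pyGetD rectangle 0 []) 1 0 + y) 0 + 1)) d) d)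
      PySem.Dict.empty
    = PySem.Dict.counter ((vals.map pvRectOf).flatMap pvCellsOf) := by
  rw [← PySem.Dict.foldl_insert_getD_add_one_eq_counter]
  simp only [List.foldl_flatMap, List.foldl_map, pvCellsOf, pvRectOf]

theorem make_coord_dict_eq (puzzle_input : List (Int × List (List Int))) :
    make_coord_dict puzzle_input = make_coord_dict_alt puzzle_input := by
  simp only [make_coord_dict, make_coord_dict_alt]
  rw [pv_dict_eq_counter, PySem.Dict.items_counter, ← PySem.List.dedup_eq_ofList, List.map_map]
  apply List.map_congr_left
  intro c _
  simp only [Function.comp]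
  rw [pv_count_cells c]

-- ===== VERDICT (by name: the statement is the Claim_ definition above) =====
theorem make_coord_dict_spec : Claim_equal_make_coord_dict := by
  intro puzzle_input _ _
  unfold Spec_make_coord_dict
  exact make_coord_dict_eq puzzle_input
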